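-- pv_equiv track=rewrite | github.com/Rachel-3/2024-Algorithm-Study | chaerim/Programmers/Level_0/Lv0_홀수_vs_짝수.py | solution
-- ===== SOURCE A (Python) =====
-- def solution(num_list):
--     answer = 0
--
--     even_number = 0
--     odd_number = 0
--     for num in range(len(num_list)):
--         if num%2 == 0:
--             even_number += num_list[num]
--         else:
--             odd_number += num_list[num]
--
--     if even_number >= odd_number:
--         answer = even_number
--     else:
--         answer = odd_number
--
--     return answer
-- ===== SOURCE B (Python) =====
-- def solution(num_list):
--     total = sum(num_list)
--     diff = 0
--     for x in reversed(num_list):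
--         diff = x - diff
--     return (total + abs(diff)) // 2
-- ===== Notes on version B (the rewrite author's own statement) =====
-- stated objective: alternative
-- what changed: Replaces the parity-branching indexed loop and final comparison with an arithmetic identity: compute the total sum (builtin sum) and the alternating sum (a reversed fold with negation, no indices or parity tests or comparisons), then return (total + abs(alternating)) // 2, which equals max(even_sum, odd_sum).
import Mathlib
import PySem

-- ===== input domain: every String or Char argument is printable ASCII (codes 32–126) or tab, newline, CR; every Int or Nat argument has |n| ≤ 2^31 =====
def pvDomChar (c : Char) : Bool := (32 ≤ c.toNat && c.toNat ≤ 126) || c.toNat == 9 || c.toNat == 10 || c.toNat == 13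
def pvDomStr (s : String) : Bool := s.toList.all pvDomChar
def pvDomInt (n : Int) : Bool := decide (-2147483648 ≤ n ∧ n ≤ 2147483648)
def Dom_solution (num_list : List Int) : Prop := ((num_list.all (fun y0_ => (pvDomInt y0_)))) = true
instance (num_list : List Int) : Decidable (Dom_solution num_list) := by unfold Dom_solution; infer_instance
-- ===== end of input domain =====

-- B computes total and alternating sums (reversed fold, no indices/parity tests) and returns (total+|alt|)//2, an arithmetic identity for max(even,odd); same O(n) cost, alternative algorithm.


-- ===== PORT A =====
-- loop body of A: parity branch on the index, indexed read (index always in range, so getD 0 is exact)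
def solStepA (num_list : List Int) (p : Int × Int) (num : Int) : Int × Int :=
  if PySem.Int.mod num 2 = 0 then (p.1 + PySem.List.pyGetD num_list num 0, p.2)
  else (p.1, p.2 + PySem.List.pyGetD num_list num 0)

def solution (num_list : List Int) : Int :=
  let s := (PySem.List.pyRange 0 (num_list.length : Int) 1).foldl (solStepA num_list) (0, 0)
  if s.1 ≥ s.2 then s.1 else s.2

-- ===== PORT B =====
-- total = sum(num_list); diff = fold over reversed(num_list) with diff := x - diff; result (total + abs(diff)) // 2
def solution_alt (num_list : List Int) : Int :=
  let total := num_list.foldl (· + ·) 0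
  let diff := num_list.reverse.foldl (fun d x => x - d) 0
  PySem.Int.floordiv (total + |diff|) 2

-- ===== PRECONDITION & SPEC =====
def Spec_solution (num_list : List Int) (out : Int) : Prop := out = solution_alt num_list
instance (num_list : List Int) (out : Int) : Decidable (Spec_solution num_list out) := by unfold Spec_solution; infer_instance

-- ===== CLAIM (what is proved, stated in full; the proofs are below) =====
def Claim_equal_solution : Prop := ∀ (num_list : List Int), Dom_solution num_list → Spec_solution num_list (solution num_list)

-- ===== LEMMAS AND PROOFS =====

-- proof helper: the pair (even-indexed sum, odd-indexed sum), by two-step structural recursion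
def solEO : List Int → Int × Int
  | [] => (0, 0)
  | [x] => (x, 0)
  | x :: y :: rest => ((solEO rest).1 + x, (solEO rest).2 + y)

lemma solEO_append_singleton : ∀ (l : List Int) (a : Int),
    solEO (l ++ [a]) =
      if l.length % 2 = 0 then ((solEO l).1 + a, (solEO l).2)
      else ((solEO l).1, (solEO l).2 + a)
  | [], a => by simp [solEO]
  | [x], a => by simp [solEO]
  | x :: y :: rest, a => by
      have h : (x :: y :: rest).length % 2 = rest.length % 2 := by
        simp [List.length_cons]; omega
      rw [List.cons_append, List.cons_append, solEO, solEO_append_singleton rest a, h]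
      split <;> simp [solEO, Prod.ext_iff] <;> ring

lemma solution_loopA (xs : List Int) (n : ℕ) (hn : n ≤ xs.length) :
    (PySem.List.pyRange 0 (n : Int) 1).foldl (solStepA xs) (0, 0) = solEO (xs.take n) := by
  induction n with
  | zero => simp [PySem.List.pyRange, solEO]
  | succ k ih =>
      have hk : k ≤ xs.length := Nat.le_of_succ_le hn
      have hlt : k < xs.length := hn
      have hr : PySem.List.pyRange 0 ((k + 1 : ℕ) : Int) 1
          = PySem.List.pyRange 0 (k : Int) 1 ++ [(k : Int)] := by
        push_cast
        exact PySem.List.pyRange_one_succ_right (by positivity)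
      rw [hr, List.foldl_append, ih hk]
      have htake : xs.take (k + 1) = xs.take k ++ [xs[k]] := by
        rw [List.take_add_one]
        simp [List.getElem?_eq_getElem hlt]
      rw [htake, solEO_append_singleton]
      have hlen : (xs.take k).length = k := List.length_take_of_le hk
      simp only [List.foldl_cons, List.foldl_nil, solStepA, hlen,
        PySem.List.pyGetD_natCast, PySem.Int.mod]
      have hf : ((k : Int)).fmod 2 = (k : Int) % 2 := by simp [Int.fmod_eq_emod]
      rcases Nat.even_or_odd k with he | ho
      · have h2' : k % 2 = 0 := Nat.even_iff.mp he
        have h2 : ((k : Int)).fmod 2 = 0 := by rw [hf]; omega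
        simp [h2, h2', List.getD, List.getElem?_eq_getElem hlt]
      · have h1 : k % 2 = 1 := Nat.odd_iff.mp ho
        have h2 : ¬ (((k : Int)).fmod 2 = 0) := by rw [hf]; omega
        have h2' : ¬ (k % 2 = 0) := by omega
        simp [h2, h2', List.getD, List.getElem?_eq_getElem hlt]

lemma solEO_sum : ∀ (l : List Int), l.foldl (· + ·) 0 = (solEO l).1 + (solEO l).2
  | [] => by simp [solEO]
  | [x] => by simp [solEO]
  | x :: y :: rest => by
      have h : ∀ (l : List Int) (a : Int), l.foldl (· + ·) a = a + l.foldl (· + ·) 0 := by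
        intro l
        induction l with
        | nil => simp
        | cons z t ih => intro a; simp only [List.foldl_cons]; rw [ih (a + z), ih (0 + z)]; ring
      simp only [List.foldl_cons, solEO]
      rw [h rest (0 + x + y), solEO_sum rest]
      ring

lemma solEO_alt : ∀ (l : List Int),
    l.reverse.foldl (fun d x => x - d) 0 = (solEO l).1 - (solEO l).2
  | [] => by simp [solEO]
  | [x] => by simp [solEO]
  | x :: y :: rest => by
      have hfr : ∀ (l : List Int) (a : Int),
          l.reverse.foldl (fun d x => x - d) a = l.foldr (fun x d => x - d) a := by
        intro l a; rw [List.foldl_reverse]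
      rw [hfr] at *
      simp only [List.foldr_cons, solEO]
      rw [← hfr, solEO_alt rest]
      ring

-- ===== VERDICT (by name: the statement is the Claim_ definition above) =====
theorem solution_spec : Claim_equal_solution := by
  intro xs _
  unfold Spec_solution solution solution_alt
  rw [solution_loopA xs xs.length le_rfl, List.take_length, solEO_sum, solEO_alt]
  rcases solEO xs with ⟨e, o⟩
  simp only
  rw [PySem.Int.floordiv_eq_ediv_of_pos (by norm_num)]
  by_cases h : o ≤ e
  · rw [abs_of_nonneg (by omega)]
    have : e + o + (e - o) = 2 * e := by ring
    rw [this, Int.mul_ediv_cancel_left _ (by norm_num)]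
    simp [h]
  · rw [abs_of_neg (by omega)]
    have : e + o + -(e - o) = 2 * o := by ring
    rw [this, Int.mul_ediv_cancel_left _ (by norm_num)]
    have : ¬ (e ≥ o) := by omega
    simp [this]
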